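-- pv_equiv track=rewrite | github.com/cpebble/advent_of_code | 2024/day22/day22.py | runsim
-- ===== SOURCE A (Python) =====
-- def runsim(seq, parr, carr):
--     a, b, c, d = seq
--     for i in range(len(carr) - 3):
--         if carr[i] != a:
--             continue
--         if carr[i + 1] != b:
--             continue
--         if carr[i + 2] != c:
--             continue
--         if carr[i + 3] != d:
--             continue
--         return parr[i+4]
--     return 0
-- ===== SOURCE B (Python) =====
-- def runsim(seq, parr, carr):
--     table = {}
--     for i, price in enumerate(parr[4:]):
--         table.setdefault(tuple(carr[i:i + 4]), price)
--     return table.get(tuple(seq), 0)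
-- ===== Notes on version B (the rewrite author's own statement) =====
-- stated objective: idiomatic
-- what changed: B replaces A's early-return scan with four elementwise comparisons per index by a single pass over enumerate(parr[4:]) that indexes every 4-change window in a dict via setdefault (first occurrence wins) and then answers with one dict lookup.
import Mathlib
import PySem

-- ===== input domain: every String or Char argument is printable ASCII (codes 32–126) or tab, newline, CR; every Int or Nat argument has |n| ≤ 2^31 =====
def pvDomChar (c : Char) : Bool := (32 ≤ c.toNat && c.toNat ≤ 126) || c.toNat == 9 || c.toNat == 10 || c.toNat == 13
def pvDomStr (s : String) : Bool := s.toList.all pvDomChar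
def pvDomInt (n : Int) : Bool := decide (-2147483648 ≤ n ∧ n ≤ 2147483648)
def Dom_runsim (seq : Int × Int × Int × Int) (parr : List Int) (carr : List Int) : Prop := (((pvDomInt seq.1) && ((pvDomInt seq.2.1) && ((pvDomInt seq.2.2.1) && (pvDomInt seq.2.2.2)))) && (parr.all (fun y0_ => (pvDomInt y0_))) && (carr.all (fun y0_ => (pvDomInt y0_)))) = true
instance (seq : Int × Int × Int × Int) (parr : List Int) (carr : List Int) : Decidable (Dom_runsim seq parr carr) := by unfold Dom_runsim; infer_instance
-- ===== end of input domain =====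

-- B builds a dict of all 4-change windows paired with their prices (setdefault: first occurrence
-- wins) in one pass over enumerate(parr[4:]) and answers with a single lookup, instead of A's
-- early-return scan with four elementwise comparisons per index; same cost, more idiomatic.

-- ===== PORT A =====
-- the loop 'for i in range(len(carr) - 3)' with its early return; every carr[i+j] it reads is in
-- range for a visited i, and parr[i+4] is in range under Pre_runsim, so pyGetD is exact there
def runsimGo (a b c d : Int) (parr carr : List Int) : List Int → Int
  | [] => 0
  | i :: rest =>
    if PySem.List.pyGetD carr i 0 ≠ a then runsimGo a b c d parr carr rest
    else if PySem.List.pyGetD carr (i + 1) 0 ≠ b then runsimGo a b c d parr carr rest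
    else if PySem.List.pyGetD carr (i + 2) 0 ≠ c then runsimGo a b c d parr carr rest
    else if PySem.List.pyGetD carr (i + 3) 0 ≠ d then runsimGo a b c d parr carr rest
    else PySem.List.pyGetD parr (i + 4) 0

def runsim (seq : Int × Int × Int × Int) (parr : List Int) (carr : List Int) : Int :=
  runsimGo seq.1 seq.2.1 seq.2.2.1 seq.2.2.2 parr carr
    (PySem.List.pyRange 0 ((carr.length : Int) - 3) 1)

-- ===== PORT B =====
-- table.setdefault(tuple(carr[i:i+4]), price); the window tuple is kept as its list of elements
def bStep (carr : List Int) (t : PySem.Dict (List Int) Int) (p : Int × Int) : PySem.Dict (List Int) Int :=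
  PySem.Dict.setdefault t (PySem.List.slice carr (some p.1) (some (p.1 + 4))) p.2

def runsim_alt (seq : Int × Int × Int × Int) (parr : List Int) (carr : List Int) : Int :=
  PySem.Dict.getD
    ((PySem.List.enumerate (PySem.List.slice parr (some 4) none) 0).foldl (bStep carr) PySem.Dict.empty)
    [seq.1, seq.2.1, seq.2.2.1, seq.2.2.2] 0

-- ===== PRECONDITION & SPEC =====
-- Pre_ excludes exactly the inputs on which A raises IndexError: those where the FIRST 4-window of
-- carr equal to seq sits at an index i with parr[i+4] out of range (B, which reads only
-- parr[4:], returns there — 0 when no earlier equal window exists).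
def Pre_runsim (seq : Int × Int × Int × Int) (parr : List Int) (carr : List Int) : Prop :=
  ∀ i ∈ List.range carr.length,
    ((carr.drop i).take 4 = [seq.1, seq.2.1, seq.2.2.1, seq.2.2.2] ∧
      ∀ j ∈ List.range i, (carr.drop j).take 4 ≠ [seq.1, seq.2.1, seq.2.2.1, seq.2.2.2]) →
    i + 4 < parr.length
instance (seq : Int × Int × Int × Int) (parr : List Int) (carr : List Int) : Decidable (Pre_runsim seq parr carr) := by unfold Pre_runsim; infer_instance

def pvWitness_runsim : (Int × Int × Int × Int) × List Int × List Int :=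
  ((1, 2, 3, 4), [9, 8, 7, 6, 5, 4], [1, 2, 3, 4, 5])

def Spec_runsim (seq : Int × Int × Int × Int) (parr : List Int) (carr : List Int) (out : Int) : Prop := out = runsim_alt seq parr carr
instance (seq : Int × Int × Int × Int) (parr : List Int) (carr : List Int) (out : Int) : Decidable (Spec_runsim seq parr carr out) := by unfold Spec_runsim; infer_instance

-- ===== CLAIM (what is proved, stated in full; the proofs are below) =====
def Claim_equal_runsim : Prop := ∀ (seq : Int × Int × Int × Int) (parr : List Int) (carr : List Int), Dom_runsim seq parr carr → Pre_runsim seq parr carr → Spec_runsim seq parr carr (runsim seq parr carr)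

-- ===== LEMMAS AND PROOFS =====

-- the first window of the given index list equal to key, mapped through val
def firstWin? (carr key : List Int) (val : Int → Int) : List Int → Option Int
  | [] => none
  | j :: rest =>
    if PySem.List.slice carr (some j) (some (j + 4)) = key then some (val j)
    else firstWin? carr key val rest

-- the same scan over natural indices, window as drop/take
def natFirst? (carr key : List Int) (val : Nat → Int) : List Nat → Option Int
  | [] => none
  | n :: rest =>
    if (carr.drop n).take 4 = key then some (val n) else natFirst? carr key val rest

theorem win_natCast (carr : List Int) (n : Nat) :
    PySem.List.slice carr (some (n : Int)) (some ((n : Int) + 4)) = (carr.drop n).take 4 := by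
  have h4 : ((n : Int) + 4) = ((n + 4 : Nat) : Int) := by push_cast; ring
  rw [h4, PySem.List.slice_natCast]
  congr 1; omega

-- get? through setdefault's append
theorem get?_append_single_of_ne (d : PySem.Dict (List Int) Int) (k k' : List Int) (v : Int)
    (h : k' ≠ k) : (PySem.Dict.mk (d.items ++ [(k, v)])).get? k' = d.get? k' := by
  simp [PySem.Dict.get?, List.find?_append, Ne.symm h]

theorem get?_append_single_self (d : PySem.Dict (List Int) Int) (k : List Int) (v : Int)
    (h : d.get? k = none) : (PySem.Dict.mk (d.items ++ [(k, v)])).get? k = some v := by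
  simp only [PySem.Dict.get?] at h ⊢
  simp [List.find?_append, Option.map_eq_none_iff.mp h]

-- main invariant for B's loop: folding setdefault over key/value pairs, then looking up key,
-- yields the table's existing binding or else the first-window scan over the remaining indices
theorem fold_invariant (carr key : List Int) (val : Int → Int) :
    ∀ (idxs : List Int) (t : PySem.Dict (List Int) Int),
      PySem.Dict.getD
        (idxs.foldl (fun t' j =>
          PySem.Dict.setdefault t' (PySem.List.slice carr (some j) (some (j + 4))) (val j)) t)
        key 0 =
      match t.get? key with
      | some v => v
      | none => (firstWin? carr key val idxs).getD 0 := by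
  intro idxs
  induction idxs with
  | nil =>
    intro t
    simp only [List.foldl_nil, PySem.Dict.getD]
    cases t.get? key <;> simp [firstWin?]
  | cons i rest ih =>
    intro t
    rw [List.foldl_cons, ih]
    by_cases hk : t.get? key = none
    · rw [hk]
      by_cases hw : PySem.List.slice carr (some i) (some (i + 4)) = key
      · have hc : t.contains key = false := by
          rw [PySem.Dict.contains_eq_isSome_get?, hk]; rfl
        simp only [PySem.Dict.setdefault, hw, hc, Bool.false_eq_true, if_false]
        rw [get?_append_single_self t _ _ hk]
        simp [firstWin?, hw]
      · have : (PySem.Dict.setdefault t (PySem.List.slice carr (some i) (some (i + 4)))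
            (val i)).get? key = none := by
          simp only [PySem.Dict.setdefault]
          split
          · exact hk
          · rw [get?_append_single_of_ne t _ _ _ (fun e => hw e.symm)]; exact hk
        rw [this]
        simp [firstWin?, hw]
    · obtain ⟨v, hv⟩ := Option.ne_none_iff_exists'.mp hk
      rw [hv]
      have : (PySem.Dict.setdefault t (PySem.List.slice carr (some i) (some (i + 4)))
          (val i)).get? key = some v := by
        simp only [PySem.Dict.setdefault]
        split
        · exact hv
        · rename_i hc
          by_cases hw : key = PySem.List.slice carr (some i) (some (i + 4))
          · exfalso
            rw [PySem.Dict.contains_eq_isSome_get?, ← hw, hv] at hc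
            simp at hc
          · rw [get?_append_single_of_ne t _ _ _ hw]; exact hv
      rw [this]

-- the window at a full in-range index, seen elementwise
theorem window_spec (carr : List Int) (n : Nat) (h : n + 4 ≤ carr.length) :
    ∃ x0 x1 x2 x3,
      (carr.drop n).take 4 = [x0, x1, x2, x3] ∧
      PySem.List.pyGetD carr (n : Int) 0 = x0 ∧
      PySem.List.pyGetD carr ((n : Int) + 1) 0 = x1 ∧
      PySem.List.pyGetD carr ((n : Int) + 2) 0 = x2 ∧
      PySem.List.pyGetD carr ((n : Int) + 3) 0 = x3 := by
  have hlen : 4 ≤ (carr.drop n).length := by simp [List.length_drop]; omega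
  obtain ⟨x0, l0, h0⟩ : ∃ y l, carr.drop n = y :: l := by
    cases e : carr.drop n with
    | nil => rw [e] at hlen; simp at hlen
    | cons y l => exact ⟨y, l, rfl⟩
  rw [h0] at hlen
  obtain ⟨x1, l1, h1⟩ : ∃ y l, l0 = y :: l := by
    cases e : l0 with
    | nil => rw [e] at hlen; simp at hlen
    | cons y l => exact ⟨y, l, rfl⟩
  rw [h1] at hlen
  obtain ⟨x2, l2, h2⟩ : ∃ y l, l1 = y :: l := by
    cases e : l1 with
    | nil => rw [e] at hlen; simp at hlen
    | cons y l => exact ⟨y, l, rfl⟩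
  rw [h2] at hlen
  obtain ⟨x3, l3, h3⟩ : ∃ y l, l2 = y :: l := by
    cases e : l2 with
    | nil => rw [e] at hlen; simp at hlen
    | cons y l => exact ⟨y, l, rfl⟩
  refine ⟨x0, x1, x2, x3, ?_, ?_, ?_, ?_, ?_⟩
  · rw [h0, h1, h2, h3]; rfl
  · rw [PySem.List.pyGetD_natCast]
    have : carr.getD n 0 = (carr.drop n).getD 0 0 := by
      simp [List.getD, List.getElem?_drop]
    rw [this, h0]; rfl
  · have e1 : ((n : Int) + 1) = (((n + 1 : Nat)) : Int) := by push_cast; ring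
    rw [e1, PySem.List.pyGetD_natCast]
    have : carr.getD (n + 1) 0 = (carr.drop n).getD 1 0 := by
      simp [List.getD, List.getElem?_drop]
    rw [this, h0, h1]; rfl
  · have e1 : ((n : Int) + 2) = (((n + 2 : Nat)) : Int) := by push_cast; ring
    rw [e1, PySem.List.pyGetD_natCast]
    have : carr.getD (n + 2) 0 = (carr.drop n).getD 2 0 := by
      simp [List.getD, List.getElem?_drop]
    rw [this, h0, h1, h2]; rfl
  · have e1 : ((n : Int) + 3) = (((n + 3 : Nat)) : Int) := by push_cast; ring
    rw [e1, PySem.List.pyGetD_natCast]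
    have : carr.getD (n + 3) 0 = (carr.drop n).getD 3 0 := by
      simp [List.getD, List.getElem?_drop]
    rw [this, h0, h1, h2, h3]; rfl

-- A's four-branch if-chain equals the first-window scan, over any in-range index list
theorem go_eq_firstWin (a b c d : Int) (parr carr : List Int) :
    ∀ (idxs : List Int), (∀ i ∈ idxs, 0 ≤ i ∧ i.toNat + 4 ≤ carr.length) →
      runsimGo a b c d parr carr idxs =
        (firstWin? carr [a, b, c, d] (fun j => PySem.List.pyGetD parr (j + 4) 0) idxs).getD 0 := by
  intro idxs
  induction idxs with
  | nil => intro _; rfl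
  | cons i rest ih =>
    intro hmem
    obtain ⟨hi0, hi4⟩ := hmem i (List.mem_cons_self)
    obtain ⟨x0, x1, x2, x3, hs, h0, h1, h2, h3⟩ := by
      have := window_spec carr i.toNat hi4
      rwa [Int.toNat_of_nonneg hi0] at this
    have hw : PySem.List.slice carr (some i) (some (i + 4)) = [x0, x1, x2, x3] := by
      have := win_natCast carr i.toNat
      rw [Int.toNat_of_nonneg hi0] at this
      rw [this, hs]
    have hrest := fun j hj => hmem j (List.mem_cons_of_mem _ hj)
    simp only [runsimGo, firstWin?, h0, h1, h2, h3, hw]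
    by_cases e0 : x0 = a <;> by_cases e1 : x1 = b <;> by_cases e2 : x2 = c <;>
      by_cases e3 : x3 = d <;> simp [e0, e1, e2, e3, ih hrest]

-- the Int scan over casted indices is the Nat scan
theorem firstWin_map_natCast (carr key : List Int) (val : Int → Int) :
    ∀ (l : List Nat),
      firstWin? carr key val (l.map (fun n : Nat => (n : Int))) =
        natFirst? carr key (fun n : Nat => val (n : Int)) l := by
  intro l
  induction l with
  | nil => rfl
  | cons n rest ih =>
    simp only [List.map_cons, firstWin?, natFirst?, win_natCast, ih]

-- the Nat scan over List.range k finds the minimal matching index as soon as k exceeds it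
theorem natFirst_range_found (carr key : List Int) (val : Nat → Int) (n0 : Nat)
    (hmatch : (carr.drop n0).take 4 = key)
    (hmin : ∀ j < n0, (carr.drop j).take 4 ≠ key) :
    ∀ k, n0 < k → natFirst? carr key val (List.range k) = some (val n0) := by
  have hone : ∀ m, (∀ j ∈ List.range m, (carr.drop j).take 4 ≠ key) →
      natFirst? carr key val (List.range m) = none := by
    intro m
    induction m with
    | zero => intro _; rfl
    | succ m ihm =>
      intro hno
      rw [List.range_succ]
      have happ : ∀ l1 l2, natFirst? carr key val (l1 ++ l2) =
          ((natFirst? carr key val l1).or (natFirst? carr key val l2)) := by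
        intro l1 l2
        induction l1 with
        | nil => simp [natFirst?]
        | cons x xs ihx =>
          simp only [List.cons_append, natFirst?]
          split <;> simp [ihx]
      rw [happ, ihm (fun j hj => hno j (by simp at hj ⊢; omega))]
      simp [natFirst?, hno m (by simp)]
  intro k
  induction k with
  | zero => omega
  | succ k ihk =>
    intro hlt
    rw [List.range_succ]
    have happ : ∀ l1 l2, natFirst? carr key val (l1 ++ l2) =
        ((natFirst? carr key val l1).or (natFirst? carr key val l2)) := by
      intro l1 l2
      induction l1 with
      | nil => simp [natFirst?]
      | cons x xs ihx =>
        simp only [List.cons_append, natFirst?]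
        split <;> simp [ihx]
    rw [happ]
    by_cases hk : n0 < k
    · rw [ihk hk]; rfl
    · have hk0 : k = n0 := by omega
      subst hk0
      rw [hone k (fun j hj => hmin j (by simpa using hj))]
      simp [natFirst?, hmatch]

-- no matching window at all: the Nat scan returns none on any index list
theorem natFirst_none (carr key : List Int) (val : Nat → Int)
    (hno : ∀ n : Nat, (carr.drop n).take 4 ≠ key) :
    ∀ l, natFirst? carr key val l = none := by
  intro l
  induction l with
  | nil => rfl
  | cons n rest ih => simp [natFirst?, hno n, ih]

-- a matching window has 4 elements, so it ends inside carr
theorem match_in_range (carr key : List Int) (n : Nat) (hkey : key.length = 4)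
    (h : (carr.drop n).take 4 = key) : n + 4 ≤ carr.length := by
  have := congrArg List.length h
  simp [List.length_take, List.length_drop, hkey] at this
  omega

-- the two value functions agree on nonnegative (casted) indices
theorem val_agree (parr : List Int) (n : Nat) :
    PySem.List.pyGetD parr ((n : Int) + 4) 0 =
      PySem.List.pyGetD (PySem.List.slice parr (some 4) none) (n : Int) 0 := by
  have hsl : PySem.List.slice parr (some (4 : Int)) none = parr.drop 4 := by
    have := PySem.List.slice_from (xs := parr) (a := 4) (by norm_num)
    simpa using this
  have e1 : ((n : Int) + 4) = (((n + 4 : Nat)) : Int) := by push_cast; ring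
  rw [hsl, e1, PySem.List.pyGetD_natCast, PySem.List.pyGetD_natCast]
  simp [List.getD, List.getElem?_drop, Nat.add_comm]

-- both ports, rewritten as the Nat scan over their respective ranges
theorem runsim_eq_natFirst (a b c d : Int) (parr carr : List Int) :
    runsim (a, b, c, d) parr carr =
      (natFirst? carr [a, b, c, d] (fun n => PySem.List.pyGetD parr ((n : Int) + 4) 0)
        (List.range ((carr.length : Int) - 3).toNat)).getD 0 := by
  unfold runsim
  rw [go_eq_firstWin a b c d parr carr _ (by
    intro i hi
    rw [PySem.List.mem_pyRange_one] at hi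
    omega)]
  rw [PySem.List.pyRange_one]
  simp only [zero_add, sub_zero]
  rw [firstWin_map_natCast]

theorem runsim_alt_eq_natFirst (a b c d : Int) (parr carr : List Int) :
    runsim_alt (a, b, c, d) parr carr =
      (natFirst? carr [a, b, c, d]
        (fun n => PySem.List.pyGetD (PySem.List.slice parr (some 4) none) ((n : Int)) 0)
        (List.range (parr.length - 4))).getD 0 := by
  unfold runsim_alt
  rw [PySem.List.enumerate_eq_map_pyRange (d := 0), List.foldl_map]
  have hstep : (fun (t : PySem.Dict (List Int) Int) (j : Int) =>
      bStep carr t (j, PySem.List.pyGetD (PySem.List.slice parr (some 4) none) j 0)) =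
      (fun t' j => PySem.Dict.setdefault t' (PySem.List.slice carr (some j) (some (j + 4)))
        ((fun j => PySem.List.pyGetD (PySem.List.slice parr (some 4) none) j 0) j)) := rfl
  rw [hstep, fold_invariant]
  have hempty : (PySem.Dict.empty : PySem.Dict (List Int) Int).get? [a, b, c, d] = none := by
    simp [PySem.Dict.empty, PySem.Dict.get?]
  rw [hempty]
  have hsl : PySem.List.slice parr (some (4 : Int)) none = parr.drop 4 := by
    have := PySem.List.slice_from (xs := parr) (a := 4) (by norm_num)
    simpa using this
  have hlen : PySem.List.len (PySem.List.slice parr (some 4) none) = ((parr.length - 4 : Nat) : Int) := by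
    simp [hsl, PySem.List.len]
  rw [hlen, PySem.List.pyRange_one]
  simp only [zero_add, sub_zero, Int.toNat_natCast]
  rw [firstWin_map_natCast]

-- ===== VERDICT (by name: the statement is the Claim_ definition above) =====
theorem runsim_spec : Claim_equal_runsim := by
  intro seq parr carr _ hpre
  obtain ⟨a, b, c, d⟩ := seq
  unfold Spec_runsim
  rw [runsim_eq_natFirst, runsim_alt_eq_natFirst]
  by_cases hex : ∃ n : Nat, (carr.drop n).take 4 = [a, b, c, d]
  · -- a matching window exists: both scans find the minimal one
    obtain ⟨n0, hn0, hmin⟩ :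
        ∃ n0, (carr.drop n0).take 4 = [a, b, c, d] ∧
          ∀ j < n0, (carr.drop j).take 4 ≠ [a, b, c, d] :=
      ⟨Nat.find hex, Nat.find_spec hex, fun j hj => Nat.find_min hex hj⟩
    have hrange : n0 + 4 ≤ carr.length := match_in_range carr _ n0 rfl hn0
    have hpre0 : n0 + 4 < parr.length := by
      apply hpre n0 (by simp; omega)
      exact ⟨hn0, fun j hj => hmin j (by simpa using hj)⟩
    rw [natFirst_range_found carr _ _ n0 hn0 hmin _ (by omega),
        natFirst_range_found carr _ _ n0 hn0 hmin _ (by omega)]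
    simp only [Option.getD_some]
    exact congrArg (fun o => o) (val_agree parr n0)
  · -- no matching window: both scans return none
    rw [not_exists] at hex
    rw [natFirst_none carr _ _ hex, natFirst_none carr _ _ hex]
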